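-- pv_equiv track=rewrite | github.com/CagyLocket/ONL_PYT_W_25_podstawy_pythona_egzamin_probny_1 | Zadania/exercise_2.py | name_sorter
-- ===== SOURCE A (Python) =====
-- def name_sorter(names):
--     """Sort names and separate male and female names.
--
--     :param list names: list of names
--     :rtype: dict
--     :return: dict with female and male names.
--     """
--     female = sorted([x for x in names if x[-1] == 'a'])
--     male = sorted([x for x in names if x[-1] != 'a'])
--
--     dict_names = {
--         'female': [],
--         'male': []
--     }
--
--     dict_names['female'].append(female)
--     dict_names['male'].append(male)
--
--     return dict_names
-- ===== SOURCE B (Python) =====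
-- def name_sorter(names):
--     """Sort names once, then partition the sorted list in a single pass."""
--     female, male = [], []
--     for x in sorted(names):
--         (female if x.endswith('a') else male).append(x)
--     return {'female': [female], 'male': [male]}
-- ===== Notes on version B (the rewrite author's own statement) =====
-- stated objective: simpler
-- what changed: B sorts the whole list once and partitions the single sorted list in one pass into two accumulators, instead of A's two filtered comprehensions each sorted separately; the dict is built as one literal instead of empty-then-append.
-- crash fix: On lists containing an empty string A raises IndexError (x[-1]); B's endswith returns False there, so B returns the empty name in the male group. — e.g. on name_sorter([""]): A raises IndexError, B returns [("female", [[]]), ("male", [[""]])]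
import Mathlib
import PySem

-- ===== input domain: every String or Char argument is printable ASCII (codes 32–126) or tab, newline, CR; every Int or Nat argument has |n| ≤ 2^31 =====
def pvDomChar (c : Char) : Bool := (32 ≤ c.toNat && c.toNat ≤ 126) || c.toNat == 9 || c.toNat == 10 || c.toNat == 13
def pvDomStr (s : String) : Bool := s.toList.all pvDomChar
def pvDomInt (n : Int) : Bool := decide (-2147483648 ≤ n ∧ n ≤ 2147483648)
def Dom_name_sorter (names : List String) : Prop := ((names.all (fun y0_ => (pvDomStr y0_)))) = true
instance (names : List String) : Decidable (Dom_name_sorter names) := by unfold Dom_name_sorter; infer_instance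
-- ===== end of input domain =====

-- B sorts the whole list once and partitions it in a single pass (A sorts two filtered lists);
-- objective: simpler. Equivalence is about the return value; neither version mutates its argument.

-- ===== PORT A =====
def name_sorter (names : List String) : List (String × List (List String)) :=
  let female := PySem.List.sorted
    (names.filter (fun x => PySem.Str.pyGet? x (-1) == some 'a')) (fun x => x) false
  let male := PySem.List.sorted
    (names.filter (fun x => !(PySem.Str.pyGet? x (-1) == some 'a'))) (fun x => x) false
  let d : PySem.Dict String (List (List String)) :=
    PySem.Dict.ofList [("female", []), ("male", [])]
  let d := d.modify "female" [] (fun l => l ++ [female])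
  let d := d.modify "male" [] (fun l => l ++ [male])
  d.items

-- ===== PORT B =====
def name_sorter_alt (names : List String) : List (String × List (List String)) :=
  let fm := (PySem.List.sorted names (fun x => x) false).foldl
    (fun (p : List String × List String) x =>
      if PySem.Str.endswith x "a" then (p.1 ++ [x], p.2) else (p.1, p.2 ++ [x]))
    ([], [])
  [("female", [fm.1]), ("male", [fm.2])]

-- ===== PRECONDITION & SPEC =====
-- Pre_ excludes lists containing an empty string: there A raises IndexError on x[-1].
def Pre_name_sorter (names : List String) : Prop := ∀ x ∈ names, x ≠ ""
instance (names : List String) : Decidable (Pre_name_sorter names) := by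
  unfold Pre_name_sorter; infer_instance
def pvWitness_name_sorter : List String := ["Anna", "Bob", "Eva"]

-- On lists containing "" A raises IndexError (x[-1]); B's endswith is False on "", so B
-- returns with the empty name in the male group.
def Raises_name_sorter (names : List String) : Prop := "" ∈ names
instance (names : List String) : Decidable (Raises_name_sorter names) := by
  unfold Raises_name_sorter; infer_instance
def pvRaiseWitness_name_sorter : List String := [""]
def pvRaiseWitnessOut_name_sorter : List (String × List (List String)) :=
  [("female", [[]]), ("male", [[""]])]

def Spec_name_sorter (names : List String) (out : List (String × List (List String))) : Prop :=
  out = name_sorter_alt names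
instance (names : List String) (out : List (String × List (List String))) :
    Decidable (Spec_name_sorter names out) := by unfold Spec_name_sorter; infer_instance

-- ===== CLAIM (what is proved, stated in full; the proofs are below) =====
def Claim_equal_name_sorter : Prop := ∀ (names : List String), Dom_name_sorter names →
  Pre_name_sorter names → Spec_name_sorter names (name_sorter names)
def Claim_raises_name_sorter : Prop :=
  (∀ (names : List String), Dom_name_sorter names → Raises_name_sorter names →
    ¬ Pre_name_sorter names) ∧
  (Dom_name_sorter pvRaiseWitness_name_sorter ∧ Raises_name_sorter pvRaiseWitness_name_sorter ∧
    name_sorter_alt pvRaiseWitness_name_sorter = pvRaiseWitnessOut_name_sorter)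

-- ===== LEMMAS AND PROOFS =====

-- A's last-character test agrees with B's endswith on nonempty strings.
theorem lastchar_eq (x : String) (h : x ≠ "") :
    (PySem.Str.pyGet? x (-1) == some 'a') = PySem.Str.endswith x "a" := by
  have hl : x.toList ≠ [] := by
    intro hc
    exact h (by simpa [String.toList_eq_nil_iff] using hc)
  simp only [PySem.Str.pyGet?_eq, PySem.Str.endswith_eq, PySem.Chars.pyGet?_eq_listPyGet?,
    PySem.List.pyGet?_neg_one]
  rw [Bool.eq_iff_iff, PySem.Chars.endswith_iff]
  rcases List.eq_nil_or_concat x.toList with h' | ⟨ys, c, h'⟩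
  · exact absurd h' hl
  · rw [h']
    constructor
    · intro hc
      simp at hc
      subst hc
      simpa only [List.concat_eq_append] using List.suffix_append ys ['a']
    · rintro ⟨t, ht⟩
      have : (t ++ "a".toList).getLast? = (ys.concat c).getLast? := by rw [ht]
      simp at this ⊢
      exact this.symm

-- B's single-pass fold is the pair of filters of the traversed list.
theorem fold_partition (q : String → Bool) (l : List String) (f m : List String) :
    l.foldl (fun (p : List String × List String) x =>
      if q x then (p.1 ++ [x], p.2) else (p.1, p.2 ++ [x])) (f, m)
    = (f ++ l.filter q, m ++ l.filter (fun x => !(q x))) := by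
  induction l generalizing f m with
  | nil => simp
  | cons a l ih =>
    by_cases ha : q a = true <;>
      simp [List.foldl_cons, ha, ih]

-- sorting commutes with filtering (both sorts are stable over the same order).
theorem sorted_filter (l : List String) (q : String → Bool) :
    PySem.List.sorted (l.filter q) (fun x => x) false
      = (PySem.List.sorted l (fun x => x) false).filter q := by
  refine PySem.List.sorted_id_eq_of_perm_of_pairwise _ _ ?_ ?_
  · exact (PySem.List.sorted_perm l (fun x => x) false).filter q
  · exact (PySem.List.sorted_pairwise l (fun x => x)).sublist List.filter_sublist

-- ===== VERDICT (by name: the statement is the Claim_ definition above) =====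
theorem name_sorter_spec : Claim_equal_name_sorter := by
  intro names _ hpre
  unfold Spec_name_sorter name_sorter name_sorter_alt
  rw [fold_partition (fun x => PySem.Str.endswith x "a")]
  have hfe : names.filter (fun x => PySem.Str.pyGet? x (-1) == some 'a')
      = names.filter (fun x => PySem.Str.endswith x "a") :=
    List.filter_congr (fun x hx => lastchar_eq x (hpre x hx))
  have hma : names.filter (fun x => !(PySem.Str.pyGet? x (-1) == some 'a'))
      = names.filter (fun x => !(PySem.Str.endswith x "a")) :=
    List.filter_congr (fun x hx => by rw [lastchar_eq x (hpre x hx)])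
  rw [hfe, hma, sorted_filter, sorted_filter]
  simp [PySem.Dict.ofList, PySem.Dict.modify, PySem.Dict.update, PySem.Dict.insert,
    PySem.Dict.empty, PySem.Dict.get?, PySem.Dict.getD, PySem.Dict.contains, List.foldl]

theorem name_sorter_raises : Claim_raises_name_sorter := by
  unfold Claim_raises_name_sorter
  refine ⟨fun names _ hr hp => hp "" hr rfl, by decide⟩

-- self-check: the crash-fix witness value above is indeed what B's port returns there
theorem name_sorter_raises_witness_ok :
    name_sorter_alt pvRaiseWitness_name_sorter = pvRaiseWitnessOut_name_sorter := by
  have h := name_sorter_raises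
  unfold Claim_raises_name_sorter at h
  exact h.2.2.2
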